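-- pv_equiv track=rewrite | github.com/redwoodresearch/Measurement-Tampering | diamonds/train_data_gen.py | check_diamond_in_repr
-- ===== SOURCE A (Python) =====
-- def check_diamond_in_repr(s: str):
--     s = s.lower()
--     diamond_positions = [i for i in range(len(s)) if s.startswith("diamond", i)]
--     for diamond_pos in diamond_positions:
--         if diamond_pos <= 0 or diamond_pos + len("diamond") >= len(s):
--             continue
--         char_on_left = s[diamond_pos - 1]
--         if char_on_left not in [" ", "["]:
--             continue
--         char_on_right = s[diamond_pos + len("diamond")]
--         if char_on_right not in [",", "]"]:
--             continue
--         return True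
--     return False
-- ===== SOURCE B (Python) =====
-- def check_diamond_in_repr(s: str):
--     s = s.lower()
--     return any(p in s for p in (" diamond,", " diamond]", "[diamond,", "[diamond]"))
-- ===== Notes on version B (the rewrite author's own statement) =====
-- stated objective: faster
-- what changed: Replaced the explicit position-collection pass and per-position delimiter-validation loop with a direct substring-membership test against the four fully delimited patterns (left delimiter + diamond + right delimiter), one containment check per pattern.
import Mathlib
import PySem

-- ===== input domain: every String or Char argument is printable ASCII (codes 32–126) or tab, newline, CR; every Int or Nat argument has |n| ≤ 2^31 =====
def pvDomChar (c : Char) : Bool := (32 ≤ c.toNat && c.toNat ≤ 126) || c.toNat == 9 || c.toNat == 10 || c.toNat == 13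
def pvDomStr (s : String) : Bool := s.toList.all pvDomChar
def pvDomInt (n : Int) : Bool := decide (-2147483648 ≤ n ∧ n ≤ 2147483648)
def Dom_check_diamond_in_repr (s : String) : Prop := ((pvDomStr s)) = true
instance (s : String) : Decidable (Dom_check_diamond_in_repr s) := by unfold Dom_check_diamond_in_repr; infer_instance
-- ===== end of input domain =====

-- B replaces A's manual occurrence-finding-and-validation loop by a direct
-- substring membership test against the four delimited patterns (measured faster by a constant factor).

-- ===== PORT A =====
-- the 'for diamond_pos in diamond_positions' loop of A (the lookups s[...] are
-- pyGet?; the guard keeps them in range, so comparing the Option to 'some c'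
-- is exact)
def pvALoop (t : List Char) : List Int → Bool
  | [] => false
  | p :: rest =>
    if p ≤ 0 ∨ p + 7 ≥ (t.length : Int) then pvALoop t rest
    else
      let cl? := PySem.List.pyGet? t (p - 1)
      if ¬ (cl? = some ' ' ∨ cl? = some '[') then pvALoop t rest
      else
        let cr? := PySem.List.pyGet? t (p + 7)
        if ¬ (cr? = some ',' ∨ cr? = some ']') then pvALoop t rest
        else true

def check_diamond_in_repr (s : String) : Bool :=
  let t := (PySem.Str.lower s).toList
  let positions := (PySem.List.pyRange 0 (t.length : Int) 1).filter
      (fun i => PySem.Chars.startswith (t.drop i.toNat) ("diamond".toList))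
  pvALoop t positions

-- ===== PORT B =====
def check_diamond_in_repr_alt (s : String) : Bool :=
  let t := PySem.Str.lower s
  [" diamond,", " diamond]", "[diamond,", "[diamond]"].any
    (fun p => PySem.Str.isIn p t)

-- ===== PRECONDITION & SPEC =====
def Spec_check_diamond_in_repr (s : String) (out : Bool) : Prop := out = check_diamond_in_repr_alt s
instance (s : String) (out : Bool) : Decidable (Spec_check_diamond_in_repr s out) := by unfold Spec_check_diamond_in_repr; infer_instance

-- ===== CLAIM (what is proved, stated in full; the proofs are below) =====
def Claim_equal_check_diamond_in_repr : Prop := ∀ (s : String), Dom_check_diamond_in_repr s → Spec_check_diamond_in_repr s (check_diamond_in_repr s)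

-- ===== LEMMAS AND PROOFS =====

-- a position p on which A's loop body returns True
def pvGood (t : List Char) (p : Int) : Prop :=
  0 < p ∧ p + 7 < (t.length : Int) ∧
  (PySem.List.pyGet? t (p - 1) = some ' ' ∨ PySem.List.pyGet? t (p - 1) = some '[') ∧
  (PySem.List.pyGet? t (p + 7) = some ',' ∨ PySem.List.pyGet? t (p + 7) = some ']')

lemma pvALoop_iff (t : List Char) (ps : List Int) :
    pvALoop t ps = true ↔ ∃ p ∈ ps, pvGood t p := by
  induction ps with
  | nil => simp [pvALoop]
  | cons p rest ih =>
    have skip : ¬ pvGood t p → (pvALoop t rest = true ↔ ∃ q ∈ p :: rest, pvGood t q) := by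
      intro hnp
      rw [ih]
      constructor
      · rintro ⟨q, hq, h⟩; exact ⟨q, List.mem_cons_of_mem _ hq, h⟩
      · rintro ⟨q, hq, h⟩
        rcases List.mem_cons.mp hq with rfl | hq'
        · exact absurd h hnp
        · exact ⟨q, hq', h⟩
    simp only [pvALoop]
    split_ifs with hg h1 h2
    · exact skip (fun h => by obtain ⟨a, b, -, -⟩ := h; omega)
    · exact iff_of_true rfl ⟨p, List.mem_cons_self, by omega, by omega, h1, h2⟩
    · exact skip (fun h => h2 h.2.2.2)
    · exact skip (fun h => h1 h.2.2.1)

-- "p is a validated occurrence" ↔ "the delimited pattern cl·diamond·cr starts at p-1"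
lemma pvPat_iff (t : List Char) (cl cr : Char) :
    (∃ j : ℕ, (cl :: ("diamond".toList ++ [cr])) <+: t.drop j) ↔
    (∃ p : ℕ, 1 ≤ p ∧ p + 8 ≤ t.length ∧ "diamond".toList <+: t.drop p ∧
       t[p-1]? = some cl ∧ t[p+7]? = some cr) := by
  constructor
  · rintro ⟨j, rest, hrest⟩
    have hlen : t.length - j = 9 + rest.length := by
      have := congrArg List.length hrest
      simp at this; omega
    have hjlen : j + 9 ≤ t.length := by omega
    refine ⟨j + 1, by omega, by omega, ?_, ?_, ?_⟩
    · have : t.drop (j + 1) = (t.drop j).drop 1 := by rw [List.drop_drop]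
      rw [this, ← hrest]
      exact ⟨[cr] ++ rest, by simp⟩
    · have h0 : t[j]? = (t.drop j)[0]? := by simp [List.getElem?_drop]
      simp only [Nat.add_sub_cancel, h0, ← hrest]
      simp
    · have h8 : t[j + 8]? = (t.drop j)[8]? := by simp [List.getElem?_drop]
      rw [show j + 1 + 7 = j + 8 from rfl, h8, ← hrest]
      simp [show "diamond".toList = ['d','i','a','m','o','n','d'] from rfl]
  · rintro ⟨p, hp1, hlen, ⟨r, hr⟩, hl, hcr⟩
    obtain ⟨q, rfl⟩ : ∃ q, p = q + 1 := ⟨p - 1, by omega⟩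
    refine ⟨q, ?_⟩
    have hq : q < t.length := by omega
    have hdq : t.drop q = cl :: t.drop (q + 1) := by
      rw [List.drop_eq_getElem_cons hq]
      have : t[q]? = some cl := by simpa using hl
      simp [List.getElem?_eq_some_iff.mp this |>.2]
    have hr7 : r = t.drop (q + 8) := by
      have : (t.drop (q + 1)).drop 7 = t.drop (q + 8) := by rw [List.drop_drop]
      rw [← this, ← hr]
      simp
    have hq8 : q + 8 < t.length := by omega
    have hd8 : t.drop (q + 8) = cr :: t.drop (q + 9) := by
      rw [List.drop_eq_getElem_cons hq8]
      have : t[q + 8]? = some cr := by simpa [show q + 1 + 7 = q + 8 from rfl] using hcr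
      simp [List.getElem?_eq_some_iff.mp this |>.2]
    refine ⟨t.drop (q + 9), ?_⟩
    rw [hdq, ← hr, hr7, hd8]
    simp

-- convert between A's Int-indexed pyGet? facts and Nat getElem? facts
lemma pvGet_nat (t : List Char) (p : Int) (n : ℕ) (h : p = (n : Int)) :
    PySem.List.pyGet? t p = t[n]? := by
  rw [h]; exact PySem.List.pyGet?_natCast t n

-- a good position in A yields the corresponding infix pattern, and conversely
lemma pvGood_to_pat (t : List Char) (p : Int)
    (hs : PySem.Chars.startswith (t.drop p.toNat) ("diamond".toList) = true)
    (hg : pvGood t p) :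
    ∃ cl cr, (cl = ' ' ∨ cl = '[') ∧ (cr = ',' ∨ cr = ']') ∧
      PySem.Chars.isIn (cl :: ("diamond".toList ++ [cr])) t = true := by
  obtain ⟨hp0, hp7, hcl, hcr⟩ := hg
  set q := p.toNat with hq
  have hqp : (q : Int) = p := Int.toNat_of_nonneg (by omega)
  have hq1 : 1 ≤ q := by omega
  have hqlen : q + 8 ≤ t.length := by omega
  have hL : PySem.List.pyGet? t (p - 1) = t[q - 1]? :=
    pvGet_nat t _ (q - 1) (by omega)
  have hR : PySem.List.pyGet? t (p + 7) = t[q + 7]? :=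
    pvGet_nat t _ (q + 7) (by omega)
  rw [hL] at hcl; rw [hR] at hcr
  rcases hcl with hcl | hcl <;> rcases hcr with hcr | hcr
  · exact ⟨' ', ',', Or.inl rfl, Or.inl rfl, (PySem.Chars.exists_prefix_drop_iff_isIn _ t).mp
      ((pvPat_iff t _ _).mpr ⟨q, hq1, hqlen, (PySem.Chars.startswith_iff _ _).mp hs, hcl, hcr⟩)⟩
  · exact ⟨' ', ']', Or.inl rfl, Or.inr rfl, (PySem.Chars.exists_prefix_drop_iff_isIn _ t).mp
      ((pvPat_iff t _ _).mpr ⟨q, hq1, hqlen, (PySem.Chars.startswith_iff _ _).mp hs, hcl, hcr⟩)⟩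
  · exact ⟨'[', ',', Or.inr rfl, Or.inl rfl, (PySem.Chars.exists_prefix_drop_iff_isIn _ t).mp
      ((pvPat_iff t _ _).mpr ⟨q, hq1, hqlen, (PySem.Chars.startswith_iff _ _).mp hs, hcl, hcr⟩)⟩
  · exact ⟨'[', ']', Or.inr rfl, Or.inr rfl, (PySem.Chars.exists_prefix_drop_iff_isIn _ t).mp
      ((pvPat_iff t _ _).mpr ⟨q, hq1, hqlen, (PySem.Chars.startswith_iff _ _).mp hs, hcl, hcr⟩)⟩

lemma pvPat_to_good (t : List Char) (cl cr : Char)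
    (hclv : cl = ' ' ∨ cl = '[') (hcrv : cr = ',' ∨ cr = ']')
    (h : PySem.Chars.isIn (cl :: ("diamond".toList ++ [cr])) t = true) :
    ∃ p : Int, (0 ≤ p ∧ p < (t.length : Int)) ∧
      PySem.Chars.startswith (t.drop p.toNat) ("diamond".toList) = true ∧ pvGood t p := by
  obtain ⟨p, hp1, hlen, hD, hl, hr⟩ :=
    (pvPat_iff t cl cr).mp ((PySem.Chars.exists_prefix_drop_iff_isIn _ t).mpr h)
  refine ⟨(p : Int), ⟨by omega, by exact_mod_cast (by omega : p < t.length)⟩, ?_, ?_, ?_, ?_, ?_⟩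
  · simpa using (PySem.Chars.startswith_iff _ _).mpr hD
  · omega
  · exact_mod_cast (by omega : p + 7 < t.length)
  · rw [pvGet_nat t _ (p - 1) (by omega), hl]
    rcases hclv with rfl | rfl
    · exact Or.inl rfl
    · exact Or.inr rfl
  · rw [pvGet_nat t _ (p + 7) (by omega), hr]
    rcases hcrv with rfl | rfl
    · exact Or.inl rfl
    · exact Or.inr rfl

theorem check_diamond_in_repr_spec : Claim_equal_check_diamond_in_repr := by
  unfold Claim_equal_check_diamond_in_repr Spec_check_diamond_in_repr
  intro s _
  unfold check_diamond_in_repr check_diamond_in_repr_alt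
  simp only [List.any_cons, List.any_nil, Bool.or_false]
  rw [Bool.eq_iff_iff]
  set t := (PySem.Str.lower s).toList with ht
  rw [pvALoop_iff]
  constructor
  · rintro ⟨p, hmem, hg⟩
    obtain ⟨hrange, hs⟩ := List.mem_filter.mp hmem
    obtain ⟨cl, cr, hclv, hcrv, hin⟩ := pvGood_to_pat t p hs hg
    simp only [Bool.or_eq_true]
    have : ∀ pat : String, pat.toList = cl :: ("diamond".toList ++ [cr]) →
        PySem.Str.isIn pat (PySem.Str.lower s) = true := by
      intro pat hpat
      simp only [PySem.Str.isIn, hpat, ← ht]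
      exact hin
    rcases hclv with rfl | rfl <;> rcases hcrv with rfl | rfl
    · exact Or.inl (this _ rfl)
    · exact Or.inr (Or.inl (this _ rfl))
    · exact Or.inr (Or.inr (Or.inl (this _ rfl)))
    · exact Or.inr (Or.inr (Or.inr (this _ rfl)))
  · intro h
    simp only [Bool.or_eq_true, PySem.Str.isIn, ← ht] at h
    have key : ∃ cl cr, (cl = ' ' ∨ cl = '[') ∧ (cr = ',' ∨ cr = ']') ∧
        PySem.Chars.isIn (cl :: ("diamond".toList ++ [cr])) t = true := by
      rcases h with h | h | h | h
      · exact ⟨' ', ',', Or.inl rfl, Or.inl rfl, h⟩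
      · exact ⟨' ', ']', Or.inl rfl, Or.inr rfl, h⟩
      · exact ⟨'[', ',', Or.inr rfl, Or.inl rfl, h⟩
      · exact ⟨'[', ']', Or.inr rfl, Or.inr rfl, h⟩
    obtain ⟨cl, cr, hclv, hcrv, hin⟩ := key
    obtain ⟨p, hrange, hs, hg⟩ := pvPat_to_good t cl cr hclv hcrv hin
    exact ⟨p, List.mem_filter.mpr ⟨PySem.List.mem_pyRange_one.mpr hrange, hs⟩, hg⟩
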